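-- pv_equiv track=rewrite | github.com/SuLab/TSRI-CBB | Coding-WorkshopsEtc/Sep2020_Algorithms-BigO-Workshop/solutions/find_kmer_clumps_code.py | clumping_kmers
-- ===== SOURCE A (Python) =====
-- def clumping_kmers(genome, kmer_length, window_length, min_kmer_count):
--     '''
--     This function finds clusters of k-mers in a genome.
--
--     * Accepts as input:
--         * `genome` — a string representing the genome of an organism.
--         * `kmer_length` - an integer representing the length of the k-mers to be considered for clumping.
--         * `window_size` — an integer representing the size of the "region of interest".
--         * `min_kmer_count` – an integer representing the minimum number of duplicate k-mers found within `window_size` of each other to be considered a cluster.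
--
--     * Returns as output:
--         * A dictionary mapping all the k-mers that satisfy the clustering criteria to a list of all the start locations within `genome` for those clusters.
--         * Each position in the list should be a start location of the k-mer satisfying the clustering criteria.
--             * For example, consider the genome `'ATATGATGATAT'` the 3-mer `'ATG'` a `window_length` of 10, and a `min_kmer_count`of 2.
--             * In reality, we could map this window to all the positions `[0, 1, 2]` — but all of these positions contain the SAME cluster, and the most relevant of those positions is `2` because it is the start of the first copy of our k-mer `'ATG'`.
--                 * Including positions 0 and 1 in our solution would be both redundant and less useful in subsequent analysis.
--     '''
--     # Collect all the unique kmers and where they occur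
--     kmers = {}
--     for start_position in range(len(genome) - kmer_length + 1):
--         kmer = genome[start_position:start_position+kmer_length]
--         if kmer not in kmers:
--             kmers[kmer] = []
--
--         kmers[kmer].append(start_position)
--
--     # For each kmer and it's locations determine if they meet
--     # the min-count within the window length.
--     candidate_kmers = {}
--     for kmer, locations in kmers.items():
--         if len(locations) < min_kmer_count:
--             continue
--
--         cluster_window_start_points = []
--
--         for location_start_index in range(0, len(locations)):
--             window_start_location = locations[location_start_index]
--
--             # Iteratively check if the next kmer is within the window length and expand the window
--             # until we reach the end of the match locations or the kmer falls outside the window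
--             for location_end_index in range(location_start_index, len(locations)):
--                 current_match_end_position = locations[location_end_index] + kmer_length
--
--                 # If the current match is outside the window, go back one location and stop.
--                 if (current_match_end_position - window_start_location) > window_length:
--                     location_end_index -= 1
--                     break
--
--             # if there are at least min_kmer_count in this window
--             # it's a candidate
--             matches_within_window = (location_end_index - location_start_index) + 1
--             if matches_within_window >= min_kmer_count:
--                 cluster_window_start_points.append(window_start_location)
--
--         # If we found at least one window for this kmer, add them.
--         if len(cluster_window_start_points) > 0:
--             candidate_kmers[kmer] = cluster_window_start_points
--
--     return candidate_kmers
-- ===== SOURCE B (Python) =====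
-- def clumping_kmers(genome, kmer_length, window_length, min_kmer_count):
--     # Group start positions by k-mer.
--     kmers = {}
--     for start_position in range(len(genome) - kmer_length + 1):
--         kmer = genome[start_position:start_position + kmer_length]
--         kmers.setdefault(kmer, []).append(start_position)
--
--     # Two-pointer sliding window over each kmer's (increasing) location list:
--     # the right pointer j never moves backwards across iterations of i.
--     candidate_kmers = {}
--     for kmer, locations in kmers.items():
--         m = len(locations)
--         if m < min_kmer_count:
--             continue
--         points = []
--         j = 0
--         for i in range(m):
--             if j < i:
--                 j = i
--             while j < m and locations[j] + kmer_length - locations[i] <= window_length: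
--                 j += 1
--             if j - i >= min_kmer_count:
--                 points.append(locations[i])
--         if points:
--             candidate_kmers[kmer] = points
--     return candidate_kmers
-- ===== Notes on version B (the rewrite author's own statement) =====
-- stated objective: alternative
-- what changed: For each k-mer's location list, A rescans forward from every start location to find the window end (a nested inner scan); B instead sweeps a single never-retreating right pointer over the sorted location list (two-pointer sliding window), removing the inner rescan.
import Mathlib
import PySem

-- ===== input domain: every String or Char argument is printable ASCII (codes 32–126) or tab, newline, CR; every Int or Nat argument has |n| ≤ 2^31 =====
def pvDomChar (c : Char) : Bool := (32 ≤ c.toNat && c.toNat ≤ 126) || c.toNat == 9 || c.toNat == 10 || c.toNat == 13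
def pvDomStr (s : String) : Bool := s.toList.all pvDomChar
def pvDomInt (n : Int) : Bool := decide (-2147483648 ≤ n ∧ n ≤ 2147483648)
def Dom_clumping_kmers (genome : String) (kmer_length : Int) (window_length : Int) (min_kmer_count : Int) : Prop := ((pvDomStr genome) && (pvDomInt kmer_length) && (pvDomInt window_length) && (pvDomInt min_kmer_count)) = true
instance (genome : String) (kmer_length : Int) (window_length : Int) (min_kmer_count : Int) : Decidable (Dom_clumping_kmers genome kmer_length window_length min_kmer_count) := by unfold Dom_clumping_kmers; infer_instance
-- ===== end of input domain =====

-- B replaces A's per-start inner rescan of each k-mer's location list by a single two-pointer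
-- sliding-window pass per k-mer (objective: alternative; the shared grouping pass dominates on
-- measured inputs, so no speed is claimed).


-- ===== PORT A =====
def aScanEnd (locations : List Int) (kmer_length window_length window_start : Int) : List Int → Int → Int
  | [], last => last
  | j :: rest, _ =>
    if PySem.List.pyGetD locations j 0 + kmer_length - window_start > window_length then j - 1
    else aScanEnd locations kmer_length window_length window_start rest j

def clumping_kmers (genome : String) (kmer_length : Int) (window_length : Int) (min_kmer_count : Int) : List (String × List Int) :=
  let kmers := (PySem.List.pyRange 0 (PySem.Str.len genome - kmer_length + 1) 1).foldl
    (fun d start_position =>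
      let kmer := PySem.Str.slice genome (some start_position) (some (start_position + kmer_length))
      let d1 := if d.contains kmer then d else d.insert kmer ([] : List Int)
      d1.insert kmer (d1.getD kmer [] ++ [start_position]))
    PySem.Dict.empty
  let candidate_kmers := kmers.items.foldl
    (fun cand kv =>
      if (kv.2.length : Int) < min_kmer_count then cand
      else
        let pts := (PySem.List.pyRange 0 (kv.2.length : Int) 1).foldl
          (fun pts li =>
            let window_start := PySem.List.pyGetD kv.2 li 0
            let endIdx := aScanEnd kv.2 kmer_length window_length window_start
                (PySem.List.pyRange li (kv.2.length : Int) 1) 0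
            if (endIdx - li) + 1 ≥ min_kmer_count then pts ++ [window_start] else pts) []
        if pts.length > 0 then cand.insert kv.1 pts else cand)
    PySem.Dict.empty
  candidate_kmers.items


-- ===== PORT B =====
def bAdvance (locations : List Int) (kmer_length window_length bound : Int) (m j : Nat) : Nat :=
  if _h : j < m then
    if PySem.List.pyGetD locations (j : Int) 0 + kmer_length - bound ≤ window_length then
      bAdvance locations kmer_length window_length bound m (j + 1)
    else j
  else j
termination_by m - j

def bLoop (locations : List Int) (kmer_length window_length min_kmer_count : Int) (m i j : Nat) (points : List Int) : List Int :=
  if _h : i < m then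
    let j1 := max j i
    let j2 := bAdvance locations kmer_length window_length (PySem.List.pyGetD locations (i : Int) 0) m j1
    let points' := if (j2 : Int) - (i : Int) ≥ min_kmer_count
      then points ++ [PySem.List.pyGetD locations (i : Int) 0] else points
    bLoop locations kmer_length window_length min_kmer_count m (i + 1) j2 points'
  else points
termination_by m - i

def clumping_kmers_alt (genome : String) (kmer_length : Int) (window_length : Int) (min_kmer_count : Int) : List (String × List Int) :=
  let kmers := (PySem.List.pyRange 0 (PySem.Str.len genome - kmer_length + 1) 1).foldl
    (fun d start_position =>
      let kmer := PySem.Str.slice genome (some start_position) (some (start_position + kmer_length))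
      let d1 := d.setdefault kmer ([] : List Int)
      d1.insert kmer (d1.getD kmer [] ++ [start_position]))
    PySem.Dict.empty
  let candidate_kmers := kmers.items.foldl
    (fun cand kv =>
      if (kv.2.length : Int) < min_kmer_count then cand
      else
        let pts := bLoop kv.2 kmer_length window_length min_kmer_count kv.2.length 0 0 []
        if pts.length > 0 then cand.insert kv.1 pts else cand)
    PySem.Dict.empty
  candidate_kmers.items


-- ===== PRECONDITION & SPEC =====
def Spec_clumping_kmers (genome : String) (kmer_length : Int) (window_length : Int) (min_kmer_count : Int) (out : List (String × List Int)) : Prop := out = clumping_kmers_alt genome kmer_length window_length min_kmer_count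
instance (genome : String) (kmer_length : Int) (window_length : Int) (min_kmer_count : Int) (out : List (String × List Int)) : Decidable (Spec_clumping_kmers genome kmer_length window_length min_kmer_count out) := by unfold Spec_clumping_kmers; infer_instance

-- ===== CLAIM (what is proved, stated in full; the proofs are below) =====
def Claim_equal_clumping_kmers : Prop := ∀ (genome : String) (kmer_length : Int) (window_length : Int) (min_kmer_count : Int), Dom_clumping_kmers genome kmer_length window_length min_kmer_count → Spec_clumping_kmers genome kmer_length window_length min_kmer_count (clumping_kmers genome kmer_length window_length min_kmer_count)


-- ===== LEMMAS AND PROOFS =====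

-- the kmer cut out at a start position (shared by both ports' first phase)
def kmerAt (genome : String) (kmer_length s : Int) : String :=
  PySem.Str.slice genome (some s) (some (s + kmer_length))

-- A's and B's first-phase loop bodies agree as functions
lemma step_eq (genome : String) (kmer_length : Int) (d : PySem.Dict String (List Int)) (s : Int) :
    (let kmer := PySem.Str.slice genome (some s) (some (s + kmer_length))
     let d1 := if d.contains kmer then d else d.insert kmer ([] : List Int)
     d1.insert kmer (d1.getD kmer [] ++ [s])) =
    (let kmer := PySem.Str.slice genome (some s) (some (s + kmer_length))
     let d1 := d.setdefault kmer ([] : List Int)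
     d1.insert kmer (d1.getD kmer [] ++ [s])) := by
  set kmer := PySem.Str.slice genome (some s) (some (s + kmer_length))
  by_cases hc : d.contains kmer
  · simp [PySem.Dict.setdefault_of_contains d _ hc, hc]
  · have hc' : d.contains kmer = false := by simpa using hc
    simp [PySem.Dict.setdefault_of_not_contains d _ hc', hc,
      PySem.Dict.getD_insert_self, PySem.Dict.insert_insert_self]


-- getD through one first-phase step
lemma getD_step (genome : String) (kmer_length : Int) (d : PySem.Dict String (List Int)) (s : Int) (c : String) :
    ((let kmer := PySem.Str.slice genome (some s) (some (s + kmer_length))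
      let d1 := if d.contains kmer then d else d.insert kmer ([] : List Int)
      d1.insert kmer (d1.getD kmer [] ++ [s])).getD c []) =
    if kmerAt genome kmer_length s = c then d.getD c [] ++ [s] else d.getD c [] := by
  show ((let kmer := kmerAt genome kmer_length s
      let d1 := if d.contains kmer then d else d.insert kmer ([] : List Int)
      d1.insert kmer (d1.getD kmer [] ++ [s])).getD c []) = _
  set kmer := kmerAt genome kmer_length s with hk
  by_cases hc : d.contains kmer
  · simp [hc, PySem.Dict.getD_insert]
    rcases eq_or_ne kmer c with h | h
    · simp [h]
    · simp [h, h.symm]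
  · have hc' : d.contains kmer = false := by simpa using hc
    simp [hc, PySem.Dict.getD_insert, PySem.Dict.getD_insert_self]
    rcases eq_or_ne kmer c with h | h
    · simp [h, PySem.Dict.getD_of_not_contains d _ (h ▸ hc')]
    · simp [h, h.symm]


-- getD through the whole first-phase fold: the location list of c is the filtered position list
lemma getD_phase1 (genome : String) (kmer_length : Int) (c : String) (l : List Int)
    (d : PySem.Dict String (List Int)) :
    ((l.foldl (fun d start_position =>
        let kmer := PySem.Str.slice genome (some start_position) (some (start_position + kmer_length))
        let d1 := if d.contains kmer then d else d.insert kmer ([] : List Int)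
        d1.insert kmer (d1.getD kmer [] ++ [start_position])) d).getD c []) =
    d.getD c [] ++ l.filter (fun s => kmerAt genome kmer_length s == c) := by
  induction l generalizing d with
  | nil => simp
  | cons s t ih =>
    simp only [List.foldl_cons, List.filter_cons]
    rw [ih, getD_step]
    by_cases h : kmerAt genome kmer_length s = c <;> simp [h]


lemma nodup_phase1 (genome : String) (kmer_length : Int) (l : List Int)
    (d : PySem.Dict String (List Int)) (hd : d.keys.Nodup) :
    ((l.foldl (fun d start_position =>
        let kmer := PySem.Str.slice genome (some start_position) (some (start_position + kmer_length))
        let d1 := if d.contains kmer then d else d.insert kmer ([] : List Int)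
        d1.insert kmer (d1.getD kmer [] ++ [start_position])) d).keys.Nodup) := by
  induction l generalizing d with
  | nil => simpa using hd
  | cons s t ih =>
    simp only [List.foldl_cons]
    apply ih
    split <;> [exact PySem.Dict.nodup_keys_insert _ _ _ hd;
      exact PySem.Dict.nodup_keys_insert _ _ _ (PySem.Dict.nodup_keys_insert _ _ _ hd)]


-- every location list stored by phase 1 is nondecreasing
lemma sorted_phase1 (genome : String) (kmer_length n : Int) (kv : String × List Int)
    (hkv : kv ∈ ((PySem.List.pyRange 0 n 1).foldl (fun d start_position =>
        let kmer := PySem.Str.slice genome (some start_position) (some (start_position + kmer_length))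
        let d1 := if d.contains kmer then d else d.insert kmer ([] : List Int)
        d1.insert kmer (d1.getD kmer [] ++ [start_position])) PySem.Dict.empty).items) :
    kv.2.Pairwise (· ≤ ·) := by
  obtain ⟨k0, v0⟩ := kv
  have hnd := nodup_phase1 genome kmer_length (PySem.List.pyRange 0 n 1) PySem.Dict.empty (by simp)
  have h := PySem.Dict.getD_of_mem_items _ hkv hnd []
  rw [getD_phase1] at h
  simp only [PySem.Dict.getD_empty, List.nil_append] at h
  have hp : ((PySem.List.pyRange 0 n 1).filter
      (fun s => kmerAt genome kmer_length s == k0)).Pairwise (· < ·) :=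
    List.Pairwise.sublist List.filter_sublist (PySem.List.pairwise_lt_pyRange_one 0 n)
  exact h ▸ (hp.imp le_of_lt)


-- ---- second phase: the two-pointer loop equals A's rescans ----

lemma bAdvance_le (locations : List Int) (k W b : Int) (m : Nat) :
    ∀ j, j ≤ m → bAdvance locations k W b m j ≤ m := by
  intro j
  induction hf : m - j using Nat.strong_induction_on generalizing j with
  | _ f ih =>
  intro hj
  rw [bAdvance]
  split
  · split
    · exact ih (m - (j+1)) (by omega) (j+1) rfl (by omega)
    · exact hj
  · exact hj

lemma bAdvance_skip (locations : List Int) (k W b : Int) (m : Nat) :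
    ∀ j jj, j ≤ jj → jj < bAdvance locations k W b m j →
      PySem.List.pyGetD locations (jj : Int) 0 + k - b ≤ W := by
  intro j
  induction hf : m - j using Nat.strong_induction_on generalizing j with
  | _ f ih =>
  intro jj h1 h2
  rw [bAdvance] at h2
  split at h2
  · split at h2
    · rcases eq_or_lt_of_le h1 with rfl | hlt
      · assumption
      · exact ih (m - (j+1)) (by omega) (j+1) rfl jj hlt h2
    · omega
  · omega

lemma bAdvance_ext (locations : List Int) (k W b : Int) (m : Nat) :
    ∀ f i j1, j1 - i ≤ f → i ≤ j1 → j1 ≤ m →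
    (∀ jj, i ≤ jj → jj < j1 → PySem.List.pyGetD locations (jj : Int) 0 + k - b ≤ W) →
    bAdvance locations k W b m j1 = bAdvance locations k W b m i := by
  intro f
  induction f with
  | zero =>
    intro i j1 h0 h1 _ _
    have h : i = j1 := by omega
    rw [h]
  | succ f ih =>
    intro i j1 h0 h1 h2 hok
    rcases eq_or_lt_of_le h1 with rfl | hlt
    · rfl
    · have hstep : bAdvance locations k W b m i = bAdvance locations k W b m (i + 1) := by
        rw [bAdvance, dif_pos (show i < m by omega), if_pos (hok i le_rfl hlt)]
      rw [hstep]
      exact ih (i + 1) j1 (by omega) (by omega) h2 (fun jj ha hb => hok jj (by omega) hb)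

lemma aScanEnd_eq (locations : List Int) (k W b : Int) (m : Nat) :
    ∀ f i, m - i ≤ f → i < m → ∀ last,
    aScanEnd locations k W b (PySem.List.pyRange (i : Int) (m : Int) 1) last =
      (bAdvance locations k W b m i : Int) - 1 := by
  intro f
  induction f with
  | zero => intro i h0 hi last; omega
  | succ f ih =>
    intro i h0 hi last
    rw [PySem.List.pyRange_one_cons (by exact_mod_cast hi)]
    rw [bAdvance, dif_pos hi]
    by_cases hc : PySem.List.pyGetD locations (i : Int) 0 + k - b ≤ W
    · rw [if_pos hc]
      simp only [aScanEnd, if_neg (not_lt.mpr hc)]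
      have hcast : (i : Int) + 1 = ((i + 1 : Nat) : Int) := by push_cast; ring
      rw [hcast]
      rcases eq_or_lt_of_le (Nat.succ_le_of_lt hi) with he | hlt
      · have hm : i + 1 = m := he
        rw [PySem.List.pyRange_one_eq_nil (by exact_mod_cast hm.ge)]
        rw [bAdvance, dif_neg (by omega)]
        simp [aScanEnd]
      · exact ih (i + 1) (by omega) hlt i
    · rw [if_neg hc]
      simp only [aScanEnd, if_pos (not_le.mp hc)]

lemma getD_mono (locations : List Int) (hmono : locations.Pairwise (· ≤ ·))
    {p q : Nat} (hpq : p ≤ q) (hq : q < locations.length) :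
    PySem.List.pyGetD locations (p : Int) 0 ≤ PySem.List.pyGetD locations (q : Int) 0 := by
  rw [PySem.List.pyGetD_natCast, PySem.List.pyGetD_natCast,
    List.getD_eq_getElem _ _ (by omega), List.getD_eq_getElem _ _ hq]
  rcases eq_or_lt_of_le hpq with rfl | h
  · exact le_refl _
  · exact List.pairwise_iff_getElem.mp hmono p q (by omega) hq h

lemma loop_eq (locations : List Int) (k W mc : Int) (hmono : locations.Pairwise (· ≤ ·)) :
    ∀ fuel i j acc, locations.length - i ≤ fuel → j ≤ locations.length →
    (∀ jj, i ≤ jj → jj < j →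
      PySem.List.pyGetD locations (jj : Int) 0 + k - PySem.List.pyGetD locations (i : Int) 0 ≤ W) →
    bLoop locations k W mc locations.length i j acc =
      (PySem.List.pyRange (i : Int) (locations.length : Int) 1).foldl
        (fun pts li =>
          let window_start := PySem.List.pyGetD locations li 0
          let endIdx := aScanEnd locations k W window_start
              (PySem.List.pyRange li (locations.length : Int) 1) 0
          if (endIdx - li) + 1 ≥ mc then pts ++ [window_start] else pts) acc := by
  set m := locations.length with hm
  intro fuel
  induction fuel with
  | zero =>
    intro i j acc h0 _ _
    have hi : ¬ i < m := by omega
    rw [bLoop, dif_neg hi, PySem.List.pyRange_one_eq_nil (by exact_mod_cast not_lt.mp hi)]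
    rfl
  | succ f ih =>
    intro i j acc h0 hj hinv
    by_cases hi : i < m
    · set b := PySem.List.pyGetD locations (i : Int) 0 with hb
      rw [bLoop, dif_pos hi]
      rw [PySem.List.pyRange_one_cons (by exact_mod_cast hi)]
      simp only [List.foldl_cons]
      -- identify the frontier
      have hmax_le : max j i ≤ m := by omega
      have hext : bAdvance locations k W b m (max j i) = bAdvance locations k W b m i := by
        apply bAdvance_ext locations k W b m (max j i - i) i (max j i) le_rfl (le_max_right _ _) hmax_le
        intro jj h1 h2
        exact hinv jj h1 (by omega)
      have hscan : aScanEnd locations k W b (PySem.List.pyRange (i : Int) (m : Int) 1) 0 =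
          (bAdvance locations k W b m i : Int) - 1 :=
        aScanEnd_eq locations k W b m (m - i) i le_rfl hi 0
      rw [hscan]
      set j2 := bAdvance locations k W b m (max j i) with hj2
      have hj2i : j2 = bAdvance locations k W b m i := hext
      -- apply IH
      have hj2le : j2 ≤ m := by rw [hj2i]; exact bAdvance_le locations k W b m i (by omega)
      have hinv' : ∀ jj, i + 1 ≤ jj → jj < j2 →
          PySem.List.pyGetD locations (jj : Int) 0 + k -
            PySem.List.pyGetD locations ((i + 1 : Nat) : Int) 0 ≤ W := by
        intro jj h1 h2
        have hjm : jj < m := lt_of_lt_of_le h2 hj2le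
        have hmono' : PySem.List.pyGetD locations (i : Int) 0 ≤
            PySem.List.pyGetD locations ((i + 1 : Nat) : Int) 0 :=
          getD_mono locations hmono (by omega) (by omega)
        have hcondi : PySem.List.pyGetD locations (jj : Int) 0 + k - b ≤ W := by
          by_cases hcase : jj < max j i
          · exact hinv jj (by omega) (by omega)
          · rw [hj2] at h2
            exact bAdvance_skip locations k W b m (max j i) jj (by omega) h2
        rw [hb] at hcondi
        omega
      rw [ih (i + 1) j2 _ (by omega) hj2le hinv']
      have hc2 : ((i : Int) + 1) = ((i + 1 : Nat) : Int) := by push_cast; ring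
      rw [hc2]
      congr 1
      rw [hj2i]
      by_cases hcc : (bAdvance locations k W b m i : Int) - 1 - (i : Int) + 1 ≥ mc
      · rw [if_pos hcc, if_pos (by omega)]
      · rw [if_neg hcc, if_neg (by omega)]
    · rw [bLoop, dif_neg hi, PySem.List.pyRange_one_eq_nil (by exact_mod_cast not_lt.mp hi)]
      rfl

-- ===== VERDICT (by name: the statement is the Claim_ definition above) =====
theorem clumping_kmers_spec : Claim_equal_clumping_kmers := by
  intro genome k W mc _
  unfold Spec_clumping_kmers clumping_kmers clumping_kmers_alt
  dsimp only
  rw [← PySem.List.foldl_congr_mem _ _ _ _ (fun acc x _ => step_eq genome k acc x)]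
  apply congrArg PySem.Dict.items
  apply PySem.List.foldl_congr_mem
  intro acc kv hkv
  dsimp only
  by_cases hlen : (kv.2.length : Int) < mc
  · rw [if_pos hlen, if_pos hlen]
  · rw [if_neg hlen, if_neg hlen]
    have hsorted := sorted_phase1 genome k _ kv hkv
    have h := loop_eq kv.2 k W mc hsorted kv.2.length 0 0 [] le_rfl (Nat.zero_le _)
      (fun jj h1 h2 => absurd h2 (by omega))
    rw [Nat.cast_zero] at h
    rw [← h]
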